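-- pv_equiv track=rewrite | github.com/BirajAd/CPP | leet/contain_water.py | least_consecutive_cards_to_match
-- ===== SOURCE A (Python) =====
-- def least_consecutive_cards_to_match(cards: list[int]) -> int:
--     # WRITE YOUR BRILLIANT CODE HERE
--     n = len(cards); l = 0
--     st = set(); ans = n+1
--     for r in range(n):
--         while cards[r] in st:
--             st.remove(cards[l])
--             ans = min(ans, r-l+1)
--             if ans == 2: return ans # can't get better
--             l += 1
--         st.add(cards[r])
--     if ans == n+1: return -1
--     return ans
-- ===== SOURCE B (Python) =====
-- def least_consecutive_cards_to_match(cards: list[int]) -> int: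
--     n = len(cards)
--     best = n + 1
--     last = {}
--     for i, v in enumerate(cards):
--         j = last.get(v)
--         if j is not None:
--             best = min(best, i - j + 1)
--         last[v] = i
--     return best if best <= n else -1
-- ===== Notes on version B (the rewrite author's own statement) =====
-- stated objective: simpler
-- what changed: Replaced A's two-pointer sliding window (a set plus an inner while-loop that shrinks the window and an early return) by a single forward pass keeping a dict of each value's last index and taking min(best, i - last[v] + 1).
import Mathlib
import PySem

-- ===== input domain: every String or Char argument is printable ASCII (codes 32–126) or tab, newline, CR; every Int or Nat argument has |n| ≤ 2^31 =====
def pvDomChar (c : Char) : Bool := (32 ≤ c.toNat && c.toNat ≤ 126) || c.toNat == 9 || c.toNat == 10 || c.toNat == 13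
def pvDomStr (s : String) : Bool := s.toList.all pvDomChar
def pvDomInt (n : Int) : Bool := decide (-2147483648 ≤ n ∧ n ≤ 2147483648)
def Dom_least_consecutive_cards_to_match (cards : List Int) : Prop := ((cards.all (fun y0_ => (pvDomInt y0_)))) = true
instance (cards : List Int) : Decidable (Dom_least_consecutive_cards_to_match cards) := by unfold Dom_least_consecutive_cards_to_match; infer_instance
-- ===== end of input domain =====

-- B replaces A's two-pointer sliding window (a set plus an inner while-loop and an early return)
-- by a single pass with a dict of last occurrences; objective: simpler. Equal return value proved.

-- ===== PORT A =====
-- inner 'while cards[r] in st' loop.  cards[l] is pyGet? (none = Python's IndexError) and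
-- st.remove is Set.remove? (none = Python's KeyError); both 'none' branches only make the
-- recursion total — they are unreachable because st holds exactly the window cards[l:r].
-- Result 'none' models the early 'return ans' taken when ans == 2.
def pvAWhile (cards : List Int) (rv : Int) (r l : Nat) (st : PySem.Set Int) (ans : Int) :
    Option (Nat × PySem.Set Int × Int) :=
  if rv ∈ st then
    match h : PySem.List.pyGet? cards (l : Int) with
    | none => some (l, st, ans)
    | some cl =>
      match PySem.Set.remove? st cl with
      | none => some (l, st, ans)
      | some st' =>
        let ans' := min ans ((r : Int) - (l : Int) + 1)
        if ans' = 2 then none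
        else pvAWhile cards rv r (l + 1) st' ans'
  else some (l, st, ans)
termination_by cards.length - l
decreasing_by
  have hl : l < cards.length := by
    rw [PySem.List.pyGet?_natCast] at h
    exact (List.getElem?_eq_some_iff.mp h).1
  omega

def pvALoop (cards : List Int) (r l : Nat) (st : PySem.Set Int) (ans : Int) : Int :=
  if hr : r < cards.length then
    match PySem.List.pyGet? cards (r : Int) with
    | none => ans
    | some rv =>
      match pvAWhile cards rv r l st ans with
      | none => 2
      | some (l', st', ans') => pvALoop cards (r + 1) l' (PySem.Set.add st' rv) ans'
  else if ans = PySem.List.len cards + 1 then -1 else ans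
termination_by cards.length - r

def least_consecutive_cards_to_match (cards : List Int) : Int :=
  pvALoop cards 0 0 PySem.Set.empty (PySem.List.len cards + 1)

-- ===== PORT B =====
-- one fold over enumerate(cards): dict 'last' of last occurrences, running minimum 'best'
def pvBStep (s : PySem.Dict Int Int × Int) (p : Int × Int) : PySem.Dict Int Int × Int :=
  match s.1.get? p.2 with
  | some j => (s.1.insert p.2 p.1, min s.2 (p.1 - j + 1))
  | none   => (s.1.insert p.2 p.1, s.2)

def least_consecutive_cards_to_match_alt (cards : List Int) : Int :=
  let n := PySem.List.len cards
  let s := (PySem.List.enumerate cards).foldl pvBStep (PySem.Dict.empty, n + 1)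
  if s.2 ≤ n then s.2 else -1

-- ===== PRECONDITION & SPEC =====
def Spec_least_consecutive_cards_to_match (cards : List Int) (out : Int) : Prop := out = least_consecutive_cards_to_match_alt cards
instance (cards : List Int) (out : Int) : Decidable (Spec_least_consecutive_cards_to_match cards out) := by unfold Spec_least_consecutive_cards_to_match; infer_instance

-- ===== CLAIM (what is proved, stated in full; the proofs are below) =====
def Claim_equal_least_consecutive_cards_to_match : Prop := ∀ (cards : List Int), Dom_least_consecutive_cards_to_match cards → Spec_least_consecutive_cards_to_match cards (least_consecutive_cards_to_match cards)

-- ===== LEMMAS AND PROOFS =====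
def cget (cards : List Int) (i : Nat) : Int := cards.getD i 0

def WinMem (cards : List Int) (l r : Nat) (st : List Int) : Prop :=
  ∀ v : Int, v ∈ st ↔ ∃ i : Nat, l ≤ i ∧ i < r ∧ cget cards i = v

def WinDistinct (cards : List Int) (l r : Nat) : Prop :=
  ∀ i j : Nat, l ≤ i → i < j → j < r → cget cards i ≠ cget cards j

def LastInv (cards : List Int) (r : Nat) (last : PySem.Dict Int Int) : Prop :=
  ∀ v : Int,
    (last.get? v = none ↔ ∀ k : Nat, k < r → cget cards k ≠ v) ∧
    (∀ j : Int, last.get? v = some j →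
      ∃ jn : Nat, j = (jn : Int) ∧ jn < r ∧ cget cards jn = v ∧
        ∀ k : Nat, jn < k → k < r → cget cards k ≠ v)

def BRun (cards : List Int) (r : Nat) (last : PySem.Dict Int Int) (best : Int) :
    PySem.Dict Int Int × Int :=
  ((PySem.List.enumerate cards).drop r).foldl pvBStep (last, best)

lemma BRun_ge (cards : List Int) (r : Nat) (hr : cards.length ≤ r)
    (last : PySem.Dict Int Int) (best : Int) : BRun cards r last best = (last, best) := by
  unfold BRun
  rw [List.drop_eq_nil_of_le (by simpa [PySem.List.length_enumerate] using hr)]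
  rfl

lemma BRun_cons (cards : List Int) (r : Nat) (hr : r < cards.length)
    (last : PySem.Dict Int Int) (best : Int) :
    BRun cards r last best =
      BRun cards (r + 1) (last.insert (cget cards r) (r : Int))
        (match last.get? (cget cards r) with
         | some j => min best ((r : Int) - j + 1)
         | none => best) := by
  unfold BRun
  rw [List.drop_eq_getElem_cons (by simpa [PySem.List.length_enumerate] using hr)]
  rw [List.foldl_cons]
  have : cget cards r = cards[r] := List.getD_eq_getElem _ _ hr
  rw [PySem.List.getElem_enumerate]
  show List.foldl pvBStep (pvBStep (last, best) (0 + (r:Int), cards[r])) _ = _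
  have h0 : (0 : Int) + (r : Int) = (r : Int) := by ring
  rw [h0, ← this]
  cases h : last.get? (cget cards r) <;> simp [pvBStep, h]

lemma LastInv_insert (cards : List Int) (r : Nat) (hr : r < cards.length)
    (last : PySem.Dict Int Int) (h : LastInv cards r last) :
    LastInv cards (r + 1) (last.insert (cget cards r) (r : Int)) := by
  intro v
  by_cases hv : v = cget cards r
  · subst hv
    rw [PySem.Dict.get?_insert_self]
    constructor
    · constructor
      · intro hn; cases hn
      · intro hk; exact absurd rfl (hk r (by omega))
    · rintro j hj
      injection hj with hj; subst hj
      exact ⟨r, rfl, by omega, rfl, by omega⟩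
  · rw [PySem.Dict.get?_insert, if_neg hv]
    obtain ⟨h1, h2⟩ := h v
    constructor
    · rw [h1]
      constructor
      · intro hall k hk
        rcases Nat.lt_succ_iff_lt_or_eq.mp hk with hk' | rfl
        · exact hall k hk'
        · exact fun he => hv he.symm
      · intro hall k hk; exact hall k (by omega)
    · intro j hj
      obtain ⟨jn, rfl, hjn, hval, hlat⟩ := h2 j hj
      refine ⟨jn, rfl, by omega, hval, ?_⟩
      intro k hk1 hk2
      rcases Nat.lt_succ_iff_lt_or_eq.mp hk2 with hk' | rfl
      · exact hlat k hk1 hk'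
      · exact fun he => hv he.symm

lemma BRun_bounds (cards : List Int) : ∀ (d r : Nat), cards.length ≤ r + d →
    ∀ (last : PySem.Dict Int Int) (best : Int), 2 ≤ best →
    (∀ v j, last.get? v = some j → j < (r : Int)) →
    2 ≤ (BRun cards r last best).2 ∧ (BRun cards r last best).2 ≤ best := by
  intro d
  induction d with
  | zero =>
    intro r hd last best hb _
    rw [BRun_ge cards r (by omega)]
    exact ⟨hb, le_refl _⟩
  | succ d ih =>
    intro r hd last best hb hvals
    by_cases hr : r < cards.length
    · rw [BRun_cons cards r hr]
      have hins : ∀ v j, (last.insert (cget cards r) (r : Int)).get? v = some j → j < ((r + 1 : Nat) : Int) := by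
        intro v j hj
        rw [PySem.Dict.get?_insert] at hj
        split_ifs at hj with he
        · injection hj with hj; subst hj; push_cast; omega
        · have := hvals v j hj; push_cast; omega
      have hb' : 2 ≤ (match last.get? (cget cards r) with
          | some j => min best ((r : Int) - j + 1)
          | none => best) ∧ (match last.get? (cget cards r) with
          | some j => min best ((r : Int) - j + 1)
          | none => best) ≤ best := by
        cases h : last.get? (cget cards r) with
        | none => exact ⟨hb, le_refl _⟩
        | some j =>
          have := hvals _ _ h
          simp only
          constructor
          · exact le_min hb (by omega)
          · exact min_le_left _ _
      have := ih (r + 1) (by omega) _ _ hb'.1 hins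
      exact ⟨this.1, le_trans this.2 hb'.2⟩
    · rw [BRun_ge cards r (by omega)]
      exact ⟨hb, le_refl _⟩

lemma WinDistinct_mono (cards : List Int) (l l' r : Nat) (h : WinDistinct cards l r)
    (hl : l ≤ l') : WinDistinct cards l' r := by
  intro i j h1 h2 h3; exact h i j (by omega) h2 h3

lemma WinMem_discard (cards : List Int) (l r : Nat) (st : PySem.Set Int) (hlr : l < r)
    (h : WinMem cards l r st) (hd : WinDistinct cards l r) :
    WinMem cards (l + 1) r (PySem.Set.discard st (cget cards l)) := by
  intro v
  rw [PySem.Set.mem_discard, h v]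
  constructor
  · rintro ⟨⟨i, h1, h2, rfl⟩, hne⟩
    exact ⟨i, by rcases Nat.eq_or_lt_of_le h1 with rfl | _; exact absurd rfl hne; omega, h2, rfl⟩
  · rintro ⟨i, h1, h2, rfl⟩
    exact ⟨⟨i, by omega, h2, rfl⟩, fun he => (hd l i (le_refl l) (by omega) h2) he.symm⟩

lemma cget_mem_of_lt (cards : List Int) (l r : Nat) (st : PySem.Set Int)
    (h : WinMem cards l r st) (h1 : l < r) : cget cards l ∈ st :=
  (h _).mpr ⟨l, le_refl l, h1, rfl⟩

lemma pyGet_cget (cards : List Int) (l : Nat) (hl : l < cards.length) :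
    PySem.List.pyGet? cards (l : Int) = some (cget cards l) := by
  rw [PySem.List.pyGet?_natCast, List.getElem?_eq_getElem hl, cget, List.getD_eq_getElem _ _ hl]

lemma pvAWhile_exit (cards : List Int) (rv : Int) (r l : Nat) (st : PySem.Set Int)
    (ans : Int) (hmem : rv ∉ st) : pvAWhile cards rv r l st ans = some (l, st, ans) := by
  rw [pvAWhile, if_neg hmem]

lemma pvAWhile_step (cards : List Int) (rv : Int) (r l : Nat) (st : PySem.Set Int)
    (ans : Int) (hmem : rv ∈ st) (hl : l < cards.length) (hcl : cget cards l ∈ st) :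
    pvAWhile cards rv r l st ans =
      (if min ans ((r : Int) - (l : Int) + 1) = 2 then none
       else pvAWhile cards rv r (l + 1) (st.discard (cget cards l))
              (min ans ((r : Int) - (l : Int) + 1))) := by
  conv_lhs => rw [pvAWhile]
  rw [if_pos hmem, pyGet_cget cards l hl]
  split
  · next heq => exact absurd heq (by simp)
  · next cl heq =>
    injection heq with heq
    subst heq
    rw [PySem.Set.remove?_of_mem hcl]

lemma pvAWhile_spec (cards : List Int) (rv : Int) (r jn : Nat)
    (hjr : jn < r) (hrn : r ≤ cards.length) (hjv : cget cards jn = rv)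
    (hlatest : ∀ k : Nat, jn < k → k < r → cget cards k ≠ rv) :
    ∀ (d l : Nat), jn = l + d → ∀ (st : PySem.Set Int) (ans : Int), 2 ≤ ans →
    WinMem cards l r st → WinDistinct cards l r →
    (min ans ((r : Int) - (jn : Int) + 1) = 2 ∧ pvAWhile cards rv r l st ans = none) ∨
    (min ans ((r : Int) - (jn : Int) + 1) ≠ 2 ∧ ∃ st',
      pvAWhile cards rv r l st ans = some (jn + 1, st', min ans ((r : Int) - (jn : Int) + 1)) ∧
      WinMem cards (jn + 1) r st') := by
  intro d
  induction d with
  | zero =>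
    intro l hld st ans h2 hw hd
    have hlj : l = jn := by omega
    subst hlj
    have hmem : rv ∈ st := (hw rv).mpr ⟨l, le_refl l, hjr, hjv⟩
    have hl : l < cards.length := lt_of_lt_of_le hjr hrn
    have hrm : PySem.Set.remove? st (cget cards l) =
        some (PySem.Set.discard st (cget cards l)) :=
      PySem.Set.remove?_of_mem (cget_mem_of_lt cards l r st hw hjr)
    rw [pvAWhile_step cards rv r l st ans hmem hl (cget_mem_of_lt cards l r st hw hjr)]
    by_cases hmin : min ans ((r : Int) - (l : Int) + 1) = 2
    · left
      refine ⟨hmin, ?_⟩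
      simp only [hmin, if_true]
    · right
      refine ⟨hmin, ⟨PySem.Set.discard st (cget cards l), ?_, ?_⟩⟩
      · rw [if_neg hmin, pvAWhile_exit]
        intro hc
        rw [PySem.Set.mem_discard] at hc
        exact hc.2 hjv.symm
      · exact WinMem_discard cards l r st hjr hw hd
  | succ d ih =>
    intro l hld st ans h2 hw hd
    have hlj : l < jn := by omega
    have hmem : rv ∈ st := (hw rv).mpr ⟨jn, by omega, hjr, hjv⟩
    have hl : l < cards.length := by omega
    have hlr : l < r := by omega
    have hrm : PySem.Set.remove? st (cget cards l) =
        some (PySem.Set.discard st (cget cards l)) :=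
      PySem.Set.remove?_of_mem (cget_mem_of_lt cards l r st hw hlr)
    rw [pvAWhile_step cards rv r l st ans hmem hl (cget_mem_of_lt cards l r st hw hlr)]
    have h3 : (3 : Int) ≤ (r : Int) - (l : Int) + 1 := by
      have : l + 2 ≤ r := by omega
      push_cast; omega
    have hjl : (r : Int) - (jn : Int) + 1 ≤ (r : Int) - (l : Int) + 1 := by push_cast; omega
    by_cases hmin : min ans ((r : Int) - (l : Int) + 1) = 2
    · left
      have ha2 : ans = 2 := by
        rcases le_total ans ((r : Int) - (l : Int) + 1) with h | h
        · rwa [min_eq_left h] at hmin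
        · rw [min_eq_right h] at hmin; omega
      constructor
      · rw [ha2, min_eq_left (by push_cast; omega)]
      · simp only [hmin, if_true]
    · rw [if_neg hmin]
      have := ih (l + 1) (by omega) (PySem.Set.discard st (cget cards l))
        (min ans ((r : Int) - (l : Int) + 1))
        (le_min h2 (by omega))
        (WinMem_discard cards l r st hlr hw hd)
        (WinDistinct_mono cards l (l + 1) r hd (by omega))
      rwa [min_assoc, min_eq_right hjl] at this

lemma pvALoop_exit (cards : List Int) (r l : Nat) (st : PySem.Set Int) (ans : Int)
    (hr : ¬ r < cards.length) :
    pvALoop cards r l st ans = if ans = PySem.List.len cards + 1 then -1 else ans := by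
  rw [pvALoop, dif_neg hr]

lemma pvALoop_go (cards : List Int) (r l : Nat) (st : PySem.Set Int) (ans : Int)
    (hr : r < cards.length) :
    pvALoop cards r l st ans =
      (match pvAWhile cards (cget cards r) r l st ans with
       | none => 2
       | some (l', st', ans') => pvALoop cards (r + 1) l' (PySem.Set.add st' (cget cards r)) ans') := by
  conv_lhs => rw [pvALoop]
  rw [dif_pos hr, pyGet_cget cards r hr]

lemma WinMem_add (cards : List Int) (l r : Nat) (st : PySem.Set Int) (hlr : l ≤ r)
    (h : WinMem cards l r st) :
    WinMem cards l (r + 1) (PySem.Set.add st (cget cards r)) := by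
  intro v
  rw [PySem.Set.mem_add, h v]
  constructor
  · rintro (⟨i, h1, h2, rfl⟩ | rfl)
    · exact ⟨i, h1, by omega, rfl⟩
    · exact ⟨r, hlr, by omega, rfl⟩
  · rintro ⟨i, h1, h2, rfl⟩
    rcases Nat.lt_succ_iff_lt_or_eq.mp h2 with h2' | rfl
    · exact Or.inl ⟨i, h1, h2', rfl⟩
    · exact Or.inr rfl

lemma WinDistinct_extend (cards : List Int) (l r : Nat) (hd : WinDistinct cards l r)
    (hnew : ∀ i : Nat, l ≤ i → i < r → cget cards i ≠ cget cards r) :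
    WinDistinct cards l (r + 1) := by
  intro i j h1 h2 h3
  rcases Nat.lt_succ_iff_lt_or_eq.mp h3 with h3' | rfl
  · exact hd i j h1 h2 h3'
  · exact hnew i h1 h2

lemma last_values_lt_insert (cards : List Int) (r : Nat) (last : PySem.Dict Int Int)
    (h : LastInv cards r last) :
    ∀ v j, (last.insert (cget cards r) (r : Int)).get? v = some j → j < ((r + 1 : Nat) : Int) := by
  intro v j hj
  rw [PySem.Dict.get?_insert] at hj
  split_ifs at hj with he
  · injection hj with hj; subst hj; push_cast; omega
  · obtain ⟨jn, rfl, hjn, -, -⟩ := (h v).2 j hj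
    push_cast; omega

lemma pvALoop_eq_BRun (cards : List Int) : ∀ (d r l : Nat) (st : PySem.Set Int)
    (ans : Int) (last : PySem.Dict Int Int), cards.length ≤ r + d →
    l ≤ r → r ≤ cards.length →
    WinMem cards l r st → WinDistinct cards l r → LastInv cards r last →
    (∀ k : Nat, k < l → ans ≤ (r : Int) - (k : Int)) →
    2 ≤ ans → ans ≤ (cards.length : Int) + 1 →
    pvALoop cards r l st ans =
      (if (BRun cards r last ans).2 ≤ (cards.length : Int) then (BRun cards r last ans).2 else -1) := by
  intro d
  induction d with
  | zero =>
    intro r l st ans last hd' hlr hrn hw hdist hlast hbnd h2 hle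
    rw [pvALoop_exit cards r l st ans (by omega), BRun_ge cards r (by omega)]
    rw [PySem.List.len_eq]
    split_ifs <;> omega
  | succ d ih =>
    intro r l st ans last hd' hlr hrn hw hdist hlast hbnd h2 hle
    by_cases hr : r < cards.length
    · rw [pvALoop_go cards r l st ans hr]
      by_cases hin : cget cards r ∈ st
      · -- duplicate inside the window at index jn
        obtain ⟨jn, hljn, hjnr, hjv⟩ := (hw (cget cards r)).mp hin
        have hlat : ∀ k : Nat, jn < k → k < r → cget cards k ≠ cget cards r := by
          intro k h1 h2 he
          exact hdist jn k hljn h1 h2 (hjv.trans he.symm)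
        have hget : last.get? (cget cards r) = some ((jn : Nat) : Int) := by
          cases hg : last.get? (cget cards r) with
          | none => exact absurd hjv (((hlast (cget cards r)).1.mp hg) jn hjnr)
          | some j =>
            obtain ⟨jn', rfl, hjn', hval', hlat'⟩ := (hlast (cget cards r)).2 j hg
            have : jn' = jn := by
              by_contra hne
              rcases Nat.lt_or_ge jn' jn with hlt | hge
              · exact hlat' jn hlt hjnr hjv
              · exact hlat jn' (by omega) hjn' hval'
            rw [this]
        have hspec := pvAWhile_spec cards (cget cards r) r jn hjnr (by omega) hjv hlat
          (jn - l) l (by omega) st ans h2 hw hdist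
        have hB : BRun cards r last ans =
            BRun cards (r + 1) (last.insert (cget cards r) (r : Int))
              (min ans ((r : Int) - (jn : Int) + 1)) := by
          rw [BRun_cons cards r hr, hget]
        have h2m : 2 ≤ min ans ((r : Int) - (jn : Int) + 1) := le_min h2 (by push_cast; omega)
        rcases hspec with ⟨hmin, heq⟩ | ⟨hmin, st', heq, hw'⟩
        · rw [heq]
          have hred : (match (none : Option (Nat × PySem.Set Int × Int)) with
              | none => (2 : Int)
              | some (l', st', ans') =>
                  pvALoop cards (r + 1) l' (PySem.Set.add st' (cget cards r)) ans') = 2 := rfl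
          rw [hred]
          have hb := BRun_bounds cards d (r + 1) (by omega)
            (last.insert (cget cards r) (r : Int)) (min ans ((r : Int) - (jn : Int) + 1))
            (by omega) (last_values_lt_insert cards r last hlast)
          rw [hB]
          have hn2 : 2 ≤ cards.length := by omega
          rw [if_pos (by omega)]
          omega
        · rw [heq]
          have hred : (match (some (jn + 1, st', min ans ((r : Int) - (jn : Int) + 1)) :
                Option (Nat × PySem.Set Int × Int)) with
              | none => (2 : Int)
              | some (l', st', ans') =>
                  pvALoop cards (r + 1) l' (PySem.Set.add st' (cget cards r)) ans') =
              pvALoop cards (r + 1) (jn + 1) (PySem.Set.add st' (cget cards r))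
                (min ans ((r : Int) - (jn : Int) + 1)) := rfl
          rw [hred, hB]
          exact ih (r + 1) (jn + 1) (PySem.Set.add st' (cget cards r))
            (min ans ((r : Int) - (jn : Int) + 1))
            (last.insert (cget cards r) (r : Int)) (by omega) (by omega) (by omega)
            (WinMem_add cards (jn + 1) r st' (by omega) hw')
            (WinDistinct_extend cards (jn + 1) r
              (WinDistinct_mono cards l (jn + 1) r hdist (by omega))
              (fun i h1 h2 => hlat i (by omega) h2))
            (LastInv_insert cards r hr last hlast)
            (fun k hk => le_trans (min_le_right _ _) (by push_cast; omega))
            h2m (le_trans (min_le_left _ _) hle)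
      · -- no duplicate in the window
        rw [pvAWhile_exit cards (cget cards r) r l st ans hin]
        have hB : BRun cards r last ans =
            BRun cards (r + 1) (last.insert (cget cards r) (r : Int)) ans := by
          rw [BRun_cons cards r hr]
          cases hg : last.get? (cget cards r) with
          | none => rfl
          | some j =>
            obtain ⟨jn', rfl, hjn', hval', hlat'⟩ := (hlast (cget cards r)).2 j hg
            have hjl : jn' < l := by
              by_contra hge
              exact hin ((hw (cget cards r)).mpr ⟨jn', by omega, hjn', hval'⟩)
            have := hbnd jn' hjl
            simp only [min_eq_left (by omega : ans ≤ (r : Int) - (jn' : Int) + 1)]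
        rw [hB]
        exact ih (r + 1) l (PySem.Set.add st (cget cards r)) ans
          (last.insert (cget cards r) (r : Int)) (by omega) (by omega) (by omega)
          (WinMem_add cards l r st hlr hw)
          (WinDistinct_extend cards l r hdist (fun i h1 h2 he =>
            hin ((hw (cget cards r)).mpr ⟨i, h1, h2, he⟩)))
          (LastInv_insert cards r hr last hlast)
          (fun k hk => by have := hbnd k hk; push_cast; omega)
          h2 hle
    · rw [pvALoop_exit cards r l st ans hr, BRun_ge cards r (by omega)]
      rw [PySem.List.len_eq]
      split_ifs <;> omega

-- ===== VERDICT (by name: the statement is the Claim_ definition above) =====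
theorem least_consecutive_cards_to_match_spec : Claim_equal_least_consecutive_cards_to_match := by
  intro cards _
  unfold Spec_least_consecutive_cards_to_match
  cases cards with
  | nil =>
    rw [least_consecutive_cards_to_match, pvALoop_exit _ _ _ _ _ (by simp)]
    simp [least_consecutive_cards_to_match_alt, PySem.List.enumerate, PySem.List.len_eq]
  | cons x xs =>
    have hlen : 1 ≤ (x :: xs).length := by simp
    have winmem0 : WinMem (x :: xs) 0 0 PySem.Set.empty := by
      intro v
      constructor
      · intro hv; simp [PySem.Set.empty] at hv
      · rintro ⟨i, -, hi, -⟩; omega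
    have windist0 : WinDistinct (x :: xs) 0 0 := by
      intro i j _ _ h3; omega
    have lastinv0 : LastInv (x :: xs) 0 PySem.Dict.empty := by
      intro v
      constructor
      · constructor
        · intro _ k hk; omega
        · intro _; exact PySem.Dict.get?_empty v
      · intro j hj
        rw [PySem.Dict.get?_empty] at hj
        cases hj
    have hmain := pvALoop_eq_BRun (x :: xs) (x :: xs).length 0 0 PySem.Set.empty
      (((x :: xs).length : Int) + 1) PySem.Dict.empty (by omega) (by omega) (by omega)
      winmem0 windist0 lastinv0 (fun k hk => by omega) (by push_cast; omega) (by omega)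
    rw [least_consecutive_cards_to_match, PySem.List.len_eq, hmain]
    rw [least_consecutive_cards_to_match_alt]
    simp only [PySem.List.len_eq, BRun, List.drop_zero]
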